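-- pv_equiv track=rewrite | github.com/edster9/python-number-to-language | api/utils.py | number_to_spanish
-- ===== SOURCE A (Python) =====
-- def number_to_spanish(number):
--     # all text translation is handled in this dictonary so other language with similar grammer can be supported
--     words = {0: 'cero', 1: 'uno', 2: 'dos', 3: 'tres', 4: 'quatro', 5: 'cinco', 6: 'seis', 7: 'siete', 8: 'ocho', 9: 'nueve', 10: 'diez',
--              11: 'once', 12: 'doce', 13: 'trece', 14: 'catorce', 15: 'quince', 16: 'dieciséis', 17: 'diecisiete', 18: 'dieciocho', 19: 'diecinueve', 20: 'veinte',
--              30: 'treinta', 40: 'cuarenta', 50: 'cincuenta', 60: 'sesenta', 70: 'setenta', 80: 'ochenta', 90: 'noventa',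
--              'h': 'ciento', 't': 'mil', 'm': 'millón', 'b': 'mil millones', 'tr': 'billones'}
--
--     # basic unit limits by order of magnitude
--     kilo = 1000
--     million = kilo * 1000
--     billion = million * 1000
--     trillion = billion * 1000
--
--     # convert the number to text translation
--     if (number < 20):
--         return words[number]
--     elif (number < 100):
--         if number % 10 == 0:
--             return words[number]
--         else:
--             return f"{words[number // 10 * 10]} y {words[number % 10]}"
--     elif (number < kilo):
--         if number % 100 == 0:
--             return f"{words[number // 100]} {words['h']}"
--         else:
--             return f"{words[number // 100]} {words['h']} {number_to_spanish(number % 100)}"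
--     elif (number < million):
--         if number % kilo == 0:
--             return f"{number_to_spanish(number // kilo)} {words['t']}"
--         else:
--             return f"{number_to_spanish(number // kilo)} {words['t']}, {number_to_spanish(number % kilo)}"
--     elif (number < billion):
--         if (number % million) == 0:
--             return f"{number_to_spanish(number // million)} {words['m']}"
--         else:
--             return f"{number_to_spanish(number // million)} {words['m']}, {number_to_spanish(number % million)}"
--     elif (number < trillion):
--         if (number % billion) == 0:
--             return f"{number_to_spanish(number // billion)} {words['b']}"
--         else:
--             return f"{number_to_spanish(number // billion)} {words['b']}, {number_to_spanish(number % billion)}"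
--     elif (number % trillion == 0):
--         return f"{number_to_spanish(number // trillion)} {words['tr']}"
--     else:
--         return f"{number_to_spanish(number // trillion)} {words['tr']}, {number_to_spanish(number % trillion)}"
--
--     raise AssertionError(
--         f"number supplied is outside supported range: {str(number)}")
-- ===== SOURCE B (Python) =====
-- def number_to_spanish(number):
--     words = {0: 'cero', 1: 'uno', 2: 'dos', 3: 'tres', 4: 'quatro', 5: 'cinco', 6: 'seis', 7: 'siete', 8: 'ocho', 9: 'nueve', 10: 'diez',
--              11: 'once', 12: 'doce', 13: 'trece', 14: 'catorce', 15: 'quince', 16: 'dieciséis', 17: 'diecisiete', 18: 'dieciocho', 19: 'diecinueve', 20: 'veinte',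
--              30: 'treinta', 40: 'cuarenta', 50: 'cincuenta', 60: 'sesenta', 70: 'setenta', 80: 'ochenta', 90: 'noventa'}
--
--     def small(n):  # 0 <= n < 1000
--         if n < 20 or (n < 100 and n % 10 == 0):
--             return words[n]
--         if n < 100:
--             return f"{words[n - n % 10]} y {words[n % 10]}"
--         head = f"{words[n // 100]} ciento"
--         return head if n % 100 == 0 else f"{head} {small(n % 100)}"
--
--     if number < 1000:
--         return small(number)
--     if number >= 10**12:
--         # astronomical tier only: peel the 'billones' prefix, rest is iterative
--         head = f"{number_to_spanish(number // 10**12)} billones"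
--         r = number % 10**12
--         return head if r == 0 else f"{head}, {number_to_spanish(r)}"
--     # 1000 <= number < 10**12: split into base-1000 groups, render each once, join
--     unit = ['', ' mil', ' millón', ' mil millones']
--     groups = []
--     n, k = number, 0
--     while n > 0:
--         groups.append((n % 1000, k))
--         n //= 1000
--         k += 1
--     parts = [small(g) + unit[i] for g, i in reversed(groups) if g != 0]
--     return ", ".join(parts)
-- ===== Notes on version B (the rewrite author's own statement) =====
-- stated objective: alternative
-- what changed: A renders recursively, re-entering the whole elif cascade for every quotient and remainder; B splits the number once into base-1000 groups with a while loop, renders each group with a non-recursive sub-1000 helper plus a scale-word table, and joins the parts with ', '.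
import Mathlib
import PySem

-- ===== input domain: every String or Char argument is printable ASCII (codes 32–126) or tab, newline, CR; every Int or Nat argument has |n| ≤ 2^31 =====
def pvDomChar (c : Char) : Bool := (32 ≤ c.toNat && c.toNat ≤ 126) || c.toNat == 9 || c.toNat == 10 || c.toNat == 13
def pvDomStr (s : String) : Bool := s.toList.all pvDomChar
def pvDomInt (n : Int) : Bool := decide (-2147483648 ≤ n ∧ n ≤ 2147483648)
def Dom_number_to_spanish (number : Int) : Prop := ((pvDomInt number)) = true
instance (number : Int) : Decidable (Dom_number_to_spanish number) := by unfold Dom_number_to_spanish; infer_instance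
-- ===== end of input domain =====

-- B replaces A's recursive magnitude cascade by splitting the number into base-1000 groups once
-- and joining the rendered groups with ", " (alternative decomposition, same cost).

-- ===== PORT A =====
-- the int-keyed part of A's `words` dict; "" stands for a missing key (KeyError, excluded by Pre_)
def spWords (n : Nat) : String :=
  match n with
  | 0 => "cero" | 1 => "uno" | 2 => "dos" | 3 => "tres" | 4 => "quatro"
  | 5 => "cinco" | 6 => "seis" | 7 => "siete" | 8 => "ocho" | 9 => "nueve"
  | 10 => "diez" | 11 => "once" | 12 => "doce" | 13 => "trece" | 14 => "catorce"
  | 15 => "quince" | 16 => "dieciséis" | 17 => "diecisiete" | 18 => "dieciocho"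
  | 19 => "diecinueve" | 20 => "veinte" | 30 => "treinta" | 40 => "cuarenta"
  | 50 => "cincuenta" | 60 => "sesenta" | 70 => "setenta" | 80 => "ochenta"
  | 90 => "noventa" | _ => ""

-- A's elif cascade, step for step (Nat carries the non-negative inputs Pre_ admits;
-- Python's // and % on non-negative ints coincide with Nat / and %; the string-key
-- lookups words['h'] … are the inlined literals)
def spGoA (n : Nat) : String :=
  if n < 20 then spWords n
  else if n < 100 then
    if n % 10 = 0 then spWords n
    else spWords (n / 10 * 10) ++ " y " ++ spWords (n % 10)
  else if n < 1000 then
    if n % 100 = 0 then spWords (n / 100) ++ " ciento"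
    else spWords (n / 100) ++ " ciento" ++ " " ++ spGoA (n % 100)
  else if n < 1000000 then
    if n % 1000 = 0 then spGoA (n / 1000) ++ " mil"
    else spGoA (n / 1000) ++ " mil" ++ ", " ++ spGoA (n % 1000)
  else if n < 1000000000 then
    if n % 1000000 = 0 then spGoA (n / 1000000) ++ " millón"
    else spGoA (n / 1000000) ++ " millón" ++ ", " ++ spGoA (n % 1000000)
  else if n < 1000000000000 then
    if n % 1000000000 = 0 then spGoA (n / 1000000000) ++ " mil millones"
    else spGoA (n / 1000000000) ++ " mil millones" ++ ", " ++ spGoA (n % 1000000000)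
  else if n % 1000000000000 = 0 then spGoA (n / 1000000000000) ++ " billones"
  else spGoA (n / 1000000000000) ++ " billones" ++ ", " ++ spGoA (n % 1000000000000)
termination_by n
decreasing_by all_goals omega

def number_to_spanish (number : Int) : String := spGoA number.toNat

-- ===== PORT B =====
-- Source B's `small`: direct rendering of 0 ≤ n < 1000
def spSmall (n : Nat) : String :=
  if n < 20 ∨ (n < 100 ∧ n % 10 = 0) then spWords n
  else if n < 100 then spWords (n - n % 10) ++ " y " ++ spWords (n % 10)
  else
    let head := spWords (n / 100) ++ " ciento"
    if n % 100 = 0 then head else head ++ " " ++ spSmall (n % 100)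
termination_by n
decreasing_by omega

-- Source B's while loop collecting (group, index) base-1000 digits, least significant first
def spGroups (n : Nat) (k : Nat) : List (Nat × Nat) :=
  if n = 0 then [] else (n % 1000, k) :: spGroups (n / 1000) (k + 1)
termination_by n
decreasing_by exact Nat.div_lt_self (by omega) (by omega)

def spUnit : List String := ["", " mil", " millón", " mil millones"]

-- Source B's list comprehension over reversed(groups)
def spParts (n : Nat) : List String :=
  ((spGroups n 0).reverse.filter (fun p => p.1 != 0)).map (fun p => spSmall p.1 ++ spUnit.getD p.2 "")

def spGoB (n : Nat) : String :=
  if n < 1000 then spSmall n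
  else if 1000000000000 ≤ n then
    let head := spGoB (n / 1000000000000) ++ " billones"
    if n % 1000000000000 = 0 then head else head ++ ", " ++ spGoB (n % 1000000000000)
  else
    PySem.Str.join ", " (spParts n)
termination_by n
decreasing_by
  · exact Nat.div_lt_self (by omega) (by omega)
  · omega

def number_to_spanish_alt (number : Int) : String := spGoB number.toNat

-- ===== PRECONDITION & SPEC =====
-- A raises KeyError on negative numbers (words[number] with number < 0); excluded.
def Pre_number_to_spanish (number : Int) : Prop := 0 ≤ number
instance (number : Int) : Decidable (Pre_number_to_spanish number) := by unfold Pre_number_to_spanish; infer_instance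
def pvWitness_number_to_spanish : Int := 123456

def Spec_number_to_spanish (number : Int) (out : String) : Prop := out = number_to_spanish_alt number
instance (number : Int) (out : String) : Decidable (Spec_number_to_spanish number out) := by unfold Spec_number_to_spanish; infer_instance

-- ===== CLAIM (what is proved, stated in full; the proofs are below) =====
def Claim_equal_number_to_spanish : Prop := ∀ (number : Int), Dom_number_to_spanish number → Pre_number_to_spanish number → Spec_number_to_spanish number (number_to_spanish number)

-- ===== LEMMAS AND PROOFS =====

theorem spGroups_zero (k : Nat) : spGroups 0 k = [] := by
  rw [spGroups]; simp

theorem spGroups_pos {n : Nat} (k : Nat) (h : n ≠ 0) :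
    spGroups n k = (n % 1000, k) :: spGroups (n / 1000) (k + 1) := by
  rw [spGroups]; simp [h]

theorem join_single (a : String) : PySem.Str.join ", " [a] = a := by
  apply String.toList_injective
  simp [PySem.Str.join, PySem.Chars.join_singleton]

theorem join_cons (a b : String) (t : List String) :
    PySem.Str.join ", " (a :: b :: t) = a ++ ", " ++ PySem.Str.join ", " (b :: t) := by
  apply String.toList_injective
  simp [PySem.Str.join, PySem.Chars.join_cons_cons]

theorem spGroups_exists : ∀ n : Nat, n ≠ 0 → ∀ k : Nat, ∃ x ∈ spGroups n k, x.1 ≠ 0 := by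
  intro n
  induction n using Nat.strong_induction_on with
  | _ n ih =>
  intro h k
  rw [spGroups_pos k h]
  by_cases h0 : n % 1000 = 0
  · obtain ⟨x, hx, hx0⟩ := ih (n / 1000) (Nat.div_lt_self (by omega) (by omega)) (by omega) (k + 1)
    exact ⟨x, List.mem_cons_of_mem _ hx, hx0⟩
  · exact ⟨(n % 1000, k), List.mem_cons_self, h0⟩

theorem parts_ne {n : Nat} (h : n ≠ 0) : spParts n ≠ [] := by
  obtain ⟨x, hx, hx0⟩ := spGroups_exists n h 0
  simp only [spParts, ne_eq, List.map_eq_nil_iff, List.filter_eq_nil_iff]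
  intro hall
  exact absurd (by simpa using hall x (List.mem_reverse.mpr hx)) (by simp [hx0])

theorem join_cons_ne (a : String) (l : List String) (h : l ≠ []) :
    PySem.Str.join ", " (a :: l) = a ++ ", " ++ PySem.Str.join ", " l := by
  cases l with
  | nil => exact absurd rfl h
  | cons b t => exact join_cons a b t

-- A's sub-1000 cascade equals Source B's `small`
theorem A_small : ∀ n : Nat, n < 1000 → spGoA n = spSmall n := by
  intro n h
  induction n using Nat.strong_induction_on with
  | _ n ih =>
    rw [spGoA, spSmall]
    by_cases h20 : n < 20
    · simp [h20]
    · by_cases h100 : n < 100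
      · by_cases hm : n % 10 = 0
        · simp [h20, h100, hm]
        · have he : n / 10 * 10 = n - n % 10 := by omega
          simp [h20, h100, hm, he]
      · have hc : ¬ (n < 20 ∨ (n < 100 ∧ n % 10 = 0)) := by omega
        by_cases hm : n % 100 = 0 <;>
          simp [h20, h100, h, hm, ih (n % 100) (by omega) (by omega)]

-- core: for 0 < m < 10^12, A's output is the ", "-join of B's group parts
theorem core : ∀ m : Nat, m < 1000000000000 → 0 < m →
    spGoA m = PySem.Str.join ", " (spParts m) := by
  intro m
  induction m using Nat.strong_induction_on with
  | _ m ih =>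
  intro hlt hpos
  by_cases t1 : m < 1000
  · have hg : spGroups m 0 = [(m, 0)] := by
      rw [spGroups_pos 0 (by omega), show m % 1000 = m by omega, show m / 1000 = 0 by omega,
          spGroups_zero]
    have hp : spParts m = [spSmall m] := by
      simp [spParts, hg, show m ≠ 0 by omega, spUnit]
    rw [hp, join_single, A_small m t1]
  · by_cases t2 : m < 1000000
    · have hg : spGroups m 0 = [(m % 1000, 0), (m / 1000, 1)] := by
        rw [spGroups_pos 0 (by omega), spGroups_pos 1 (by omega),
            show m / 1000 % 1000 = m / 1000 by omega, show m / 1000 / 1000 = 0 by omega,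
            spGroups_zero]
      rw [spGoA]
      by_cases hr : m % 1000 = 0
      · have hp : spParts m = [spSmall (m / 1000) ++ " mil"] := by
          simp [spParts, hg, hr, show m / 1000 ≠ 0 by omega, spUnit]
        simp [hp, join_single, show ¬ m < 20 by omega, show ¬ m < 100 by omega, t1, t2, hr,
              A_small (m / 1000) (by omega)]
      · have hp : spParts m = [spSmall (m / 1000) ++ " mil", spSmall (m % 1000)] := by
          simp [spParts, hg, hr, show m / 1000 ≠ 0 by omega, spUnit]
        simp [hp, join_cons, join_single, show ¬ m < 20 by omega, show ¬ m < 100 by omega, t1, t2,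
              hr, A_small (m / 1000) (by omega), A_small (m % 1000) (by omega)]
    · by_cases t3 : m < 1000000000
      · have hg : spGroups m 0 =
            [(m % 1000, 0), (m / 1000 % 1000, 1), (m / 1000000, 2)] := by
          rw [spGroups_pos 0 (by omega), spGroups_pos 1 (by omega),
              show m / 1000 / 1000 = m / 1000000 by omega, spGroups_pos 2 (by omega),
              show m / 1000000 % 1000 = m / 1000000 by omega,
              show m / 1000000 / 1000 = 0 by omega, spGroups_zero]
        rw [spGoA]
        by_cases hr : m % 1000000 = 0
        · have hp : spParts m = [spSmall (m / 1000000) ++ " millón"] := by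
            simp [spParts, hg, show m % 1000 = 0 by omega, show m / 1000 % 1000 = 0 by omega,
                  show m / 1000000 ≠ 0 by omega, spUnit]
          simp [hp, join_single, show ¬ m < 20 by omega, show ¬ m < 100 by omega, t1, t2, t3, hr,
                A_small (m / 1000000) (by omega)]
        · by_cases hsub : m % 1000000 < 1000
          · have hp : spParts m = [spSmall (m / 1000000) ++ " millón", spSmall (m % 1000)] := by
              simp [spParts, hg, show m / 1000 % 1000 = 0 by omega, show ¬ m % 1000 = 0 by omega,
                    show m / 1000000 ≠ 0 by omega, spUnit]
            simp [hp, join_cons, join_single, show ¬ m < 20 by omega, show ¬ m < 100 by omega,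
                  t1, t2, t3, show m % 1000000 = m % 1000 by omega, show ¬ m % 1000 = 0 by omega,
                  A_small (m / 1000000) (by omega), A_small (m % 1000) (by omega)]
          · have hgr : spGroups (m % 1000000) 0 = [(m % 1000, 0), (m / 1000 % 1000, 1)] := by
              rw [spGroups_pos 0 (by omega), spGroups_pos 1 (by omega),
                  show m % 1000000 % 1000 = m % 1000 by omega,
                  show m % 1000000 / 1000 = m / 1000 % 1000 by omega,
                  show m / 1000 % 1000 % 1000 = m / 1000 % 1000 by omega,
                  show m / 1000 % 1000 / 1000 = 0 by omega, spGroups_zero]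
            have hp : spParts m =
                (spSmall (m / 1000000) ++ " millón") :: spParts (m % 1000000) := by
              simp [spParts, hg, hgr, show m / 1000000 ≠ 0 by omega, spUnit]
            have hrem := ih (m % 1000000) (by omega) (by omega) (by omega)
            rw [hp, join_cons_ne _ _ (parts_ne (by omega)), ← hrem]
            simp [show ¬ m < 20 by omega, show ¬ m < 100 by omega, t1, t2, t3, hr,
                  A_small (m / 1000000) (by omega)]
      · have hg : spGroups m 0 =
            [(m % 1000, 0), (m / 1000 % 1000, 1), (m / 1000000 % 1000, 2),
             (m / 1000000000, 3)] := by
          rw [spGroups_pos 0 (by omega), spGroups_pos 1 (by omega),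
              show m / 1000 / 1000 = m / 1000000 by omega, spGroups_pos 2 (by omega),
              show m / 1000000 / 1000 = m / 1000000000 by omega, spGroups_pos 3 (by omega),
              show m / 1000000000 % 1000 = m / 1000000000 by omega,
              show m / 1000000000 / 1000 = 0 by omega, spGroups_zero]
        rw [spGoA]
        by_cases hr : m % 1000000000 = 0
        · have hp : spParts m = [spSmall (m / 1000000000) ++ " mil millones"] := by
            simp [spParts, hg, show m % 1000 = 0 by omega, show m / 1000 % 1000 = 0 by omega,
                  show m / 1000000 % 1000 = 0 by omega, show m / 1000000000 ≠ 0 by omega, spUnit]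
          simp [hp, join_single, show ¬ m < 20 by omega, show ¬ m < 100 by omega, t1, t2, t3,
                hlt, hr, A_small (m / 1000000000) (by omega)]
        · by_cases hs1 : m % 1000000000 < 1000
          · have hp : spParts m =
                [spSmall (m / 1000000000) ++ " mil millones", spSmall (m % 1000)] := by
              simp [spParts, hg, show m / 1000 % 1000 = 0 by omega,
                    show m / 1000000 % 1000 = 0 by omega, show ¬ m % 1000 = 0 by omega,
                    show m / 1000000000 ≠ 0 by omega, spUnit]
            simp [hp, join_cons, join_single, show ¬ m < 20 by omega, show ¬ m < 100 by omega,
                  t1, t2, t3, hlt, show m % 1000000000 = m % 1000 by omega, show ¬ m % 1000 = 0 by omega,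
                  A_small (m / 1000000000) (by omega), A_small (m % 1000) (by omega)]
          · by_cases hs2 : m % 1000000000 < 1000000
            · have hgr : spGroups (m % 1000000000) 0 =
                  [(m % 1000, 0), (m / 1000 % 1000, 1)] := by
                rw [spGroups_pos 0 (by omega), spGroups_pos 1 (by omega),
                    show m % 1000000000 % 1000 = m % 1000 by omega,
                    show m % 1000000000 / 1000 = m / 1000 % 1000 by omega,
                    show m / 1000 % 1000 % 1000 = m / 1000 % 1000 by omega,
                    show m / 1000 % 1000 / 1000 = 0 by omega, spGroups_zero]
              have hp : spParts m =
                  (spSmall (m / 1000000000) ++ " mil millones") :: spParts (m % 1000000000) := by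
                simp [spParts, hg, hgr, show m / 1000000 % 1000 = 0 by omega,
                      show m / 1000000000 ≠ 0 by omega, spUnit]
              have hrem := ih (m % 1000000000) (by omega) (by omega) (by omega)
              rw [hp, join_cons_ne _ _ (parts_ne (by omega)), ← hrem]
              simp [show ¬ m < 20 by omega, show ¬ m < 100 by omega, t1, t2, t3, hlt, hr,
                    A_small (m / 1000000000) (by omega)]
            · have hgr : spGroups (m % 1000000000) 0 =
                  [(m % 1000, 0), (m / 1000 % 1000, 1), (m / 1000000 % 1000, 2)] := by
                rw [spGroups_pos 0 (by omega), spGroups_pos 1 (by omega),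
                    show m % 1000000000 % 1000 = m % 1000 by omega,
                    show m % 1000000000 / 1000 / 1000 = m / 1000000 % 1000 by omega,
                    show m % 1000000000 / 1000 % 1000 = m / 1000 % 1000 by omega,
                    spGroups_pos 2 (by omega),
                    show m / 1000000 % 1000 % 1000 = m / 1000000 % 1000 by omega,
                    show m / 1000000 % 1000 / 1000 = 0 by omega, spGroups_zero]
              have hp : spParts m =
                  (spSmall (m / 1000000000) ++ " mil millones") :: spParts (m % 1000000000) := by
                simp [spParts, hg, hgr, show m / 1000000000 ≠ 0 by omega, spUnit]
              have hrem := ih (m % 1000000000) (by omega) (by omega) (by omega)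
              rw [hp, join_cons_ne _ _ (parts_ne (by omega)), ← hrem]
              simp [show ¬ m < 20 by omega, show ¬ m < 100 by omega, t1, t2, t3, hlt, hr,
                    A_small (m / 1000000000) (by omega)]

-- ===== VERDICT (by name: the statement is the Claim_ definition above) =====
theorem number_to_spanish_spec : Claim_equal_number_to_spanish := by
  intro number hDom hPre
  unfold Spec_number_to_spanish number_to_spanish number_to_spanish_alt
  have hd : number.toNat < 1000000000000 := by
    unfold Dom_number_to_spanish pvDomInt at hDom
    simp at hDom
    omega
  by_cases h : number.toNat < 1000
  · rw [spGoB]; simp [h, A_small _ h]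
  · rw [spGoB]; simp [h, show ¬ 1000000000000 ≤ number.toNat by omega]
    exact core _ hd (by omega)
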